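-- pv_equiv track=rewrite | github.com/gimquokka/problem-solving | JinyounKim/이코테 (동빈북)/Part3/15_binary_search/30_lyric_s.py | solution
-- ===== SOURCE A (Python) =====
-- from bisect import bisect_left, bisect_right
--
-- def count_by_range(a, left, right):
--     """
--     # Motive #
--     "as" > "vd" => False
--     python support str comparision
--
--     # Input #
--     a: array,
--     left: searched element left-side,
--     right: "" right-side
--
--     # Output #
--     number of element between left and right
--
--     # Time complexity #
--     O(log(n))
--     """
--     left = bisect_left(a,left)
--     right = bisect_right(a, right)
--     return right-left
--
-- def solution(words, queries):
--     """
--     # Input #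
--     words: array with all word,
--     queries: object for searching
--
--     # Output #
--     answer: array with numbers that is occurance count in words array
--
--     # Time complexity #
--     W: length of words
--     w: small w that is stisfied [eq: w1 + w2 + w3 ..... = W]
--     Q: "" of queries
--     C: constant (= Max length of word)
--
--     O(2C+2W+2Clog(w)+Qlog(w))
--     => O(C+W+Clog(w)+Qlog(w))
--     """
--     answer = []
--     # Time complexity = O(2C) #
--     a = [[] for _ in range(10001)]
--     # For the cases of ??abc. Bcz It is imposible binary searching (= BS)
--     reverse_a = [[] for _ in range(10001)]
--
--     # Asign input element to a, reverse_a length by length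
--     for word in words:
--         length = len(word)
--         a[length].append(word)
--         reverse_a[length].append(word[::-1])
--
--     # Sort all element in a, reverse_a for BS
--     for i in range(10001):
--         a[i].sort()
--         reverse_a[i].sort()
--
--     # Process queries using count_by_range func
--     for q in queries:
--         result = 0
--         length = len(q)
--         # In case of "?" located in prefix
--         if q[0] == '?':
--             result = count_by_range(reverse_a[length], q[::-1].replace('?', 'a'), q[::-1].replace('?', 'z'))
--         # "" "?" in suffix
--         else:
--             result = count_by_range(a[length], q.replace('?', 'a'), q.replace('?', 'z'))
--
--         # append num of element matched with quiries at answer array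
--         answer.append(result)
--
--     return answer
-- ===== SOURCE B (Python) =====
-- def solution(words, queries):
--     # Simpler: one direct counting pass over words per query; no 10001 buckets,
--     # no sorting, no binary search.  Same range-comparison semantics as A.
--     answer = []
--     for q in queries:
--         rev = q[0] == '?'
--         pat = q[::-1] if rev else q
--         lo = pat.replace('?', 'a')
--         hi = pat.replace('?', 'z')
--         n = len(q)
--         cnt = sum(1 for w in words
--                   if len(w) == n and lo <= (w[::-1] if rev else w) <= hi)
--         answer.append(cnt)
--     return answer
-- ===== Notes on version B (the rewrite author's own statement) =====
-- stated objective: simpler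
-- what changed: Replaced A's 10001 length-indexed buckets + per-bucket sort + bisect range counting with a direct per-query counting scan over words using the same lexicographic range test.
import Mathlib
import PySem

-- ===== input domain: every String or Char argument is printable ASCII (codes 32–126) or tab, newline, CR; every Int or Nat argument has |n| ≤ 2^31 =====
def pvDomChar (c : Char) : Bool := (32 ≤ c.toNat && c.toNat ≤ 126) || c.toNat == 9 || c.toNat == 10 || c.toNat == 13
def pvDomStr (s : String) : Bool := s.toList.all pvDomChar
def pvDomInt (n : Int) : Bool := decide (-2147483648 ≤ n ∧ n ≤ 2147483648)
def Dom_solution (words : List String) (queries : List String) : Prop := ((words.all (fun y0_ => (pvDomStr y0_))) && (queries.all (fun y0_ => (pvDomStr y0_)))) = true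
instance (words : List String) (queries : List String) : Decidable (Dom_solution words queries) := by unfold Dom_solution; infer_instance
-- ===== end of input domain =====

-- B replaces A's 10001 length buckets + per-bucket sort + bisect range counting by a direct
-- per-query counting scan over words with the same lexicographic range test (simpler, not faster).

-- shared primitive wrapper: Python's s[::-1]
def pyRev (s : String) : String := (PySem.Str.slice? s none none (-1)).getD ""

-- ===== PORT A =====
def count_by_range (a : List String) (left : String) (right : String) : Int :=
  let left' := PySem.List.bisectLeft a left
  let right' := PySem.List.bisectRight a right
  (right' : Int) - (left' : Int)

def solution (words : List String) (queries : List String) : List Int :=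
  -- a = [[] for _ in range(10001)]; reverse_a likewise
  let a0 : List (List String) := List.replicate 10001 []
  let ra0 : List (List String) := List.replicate 10001 []
  -- for word in words: a[length].append(word); reverse_a[length].append(word[::-1])
  let st := words.foldl (fun (st : List (List String) × List (List String)) word =>
      let length := word.length
      (st.1.set length (st.1.getD length [] ++ [word]),
       st.2.set length (st.2.getD length [] ++ [pyRev word]))) (a0, ra0)
  -- for i in range(10001): a[i].sort(); reverse_a[i].sort()   (sort every bucket in place)
  let a := st.1.map (fun l => PySem.List.sorted l (fun x => x))
  let ra := st.2.map (fun l => PySem.List.sorted l (fun x => x))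
  -- for q in queries: ... answer.append(result)
  queries.foldl (fun answer q =>
    let length := q.length
    let result : Int :=
      match PySem.Str.pyGet? q 0 with
      | none => 0   -- Python raises IndexError on q[0] here; excluded by Pre_solution
      | some c =>
        if c = '?' then
          count_by_range (ra.getD length [])
            (PySem.Str.replace (pyRev q) "?" "a") (PySem.Str.replace (pyRev q) "?" "z")
        else
          count_by_range (a.getD length [])
            (PySem.Str.replace q "?" "a") (PySem.Str.replace q "?" "z")
    answer ++ [result]) []

-- ===== PORT B =====
def solution_alt (words : List String) (queries : List String) : List Int :=
  queries.map (fun q =>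
    let rev : Bool := PySem.Str.pyGet? q 0 == some '?'
    let pat := if rev then pyRev q else q
    let lo := PySem.Str.replace pat "?" "a"
    let hi := PySem.Str.replace pat "?" "z"
    let n := q.length
    ((words.countP (fun w =>
        decide (w.length = n) && decide (lo ≤ (if rev then pyRev w else w))
          && decide ((if rev then pyRev w else w) ≤ hi)) : Nat) : Int))

-- ===== PRECONDITION & SPEC =====
-- Pre_ excludes exactly the inputs where Python A raises IndexError: an empty query
-- (q[0]) or a word/query longer than 10000 (a[length] with only 10001 buckets).
def Pre_solution (words : List String) (queries : List String) : Prop :=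
  (∀ w ∈ words, w.length ≤ 10000) ∧ (∀ q ∈ queries, q ≠ "" ∧ q.length ≤ 10000)
instance (words : List String) (queries : List String) : Decidable (Pre_solution words queries) := by
  unfold Pre_solution; infer_instance

def pvWitness_solution : List String × List String :=
  (["frodo", "front", "frost", "frozen", "frame", "kakao"], ["fro??", "????o", "fr???", "fro???", "pro?"])

def Spec_solution (words : List String) (queries : List String) (out : List Int) : Prop := out = solution_alt words queries
instance (words : List String) (queries : List String) (out : List Int) : Decidable (Spec_solution words queries out) := by unfold Spec_solution; infer_instance

-- ===== CLAIM (what is proved, stated in full; the proofs are below) =====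
def Claim_equal_solution : Prop := ∀ (words : List String) (queries : List String), Dom_solution words queries → Pre_solution words queries → Spec_solution words queries (solution words queries)

-- ===== LEMMAS AND PROOFS =====

theorem go_single (o nc : Char) : ∀ (l : List Char) (fuel : Nat) (acc : List Char),
    l.length ≤ fuel →
    PySem.Chars.replace.go [o] [nc] fuel l acc
      = acc.reverse ++ l.map (fun c => if c = o then nc else c) := by
  intro l
  induction l with
  | nil => intro fuel acc _; cases fuel <;> simp [PySem.Chars.replace.go]
  | cons c t ih =>
    intro fuel acc hf
    cases fuel with
    | zero => simp at hf
    | succ f =>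
      simp only [PySem.Chars.replace.go]
      by_cases hc : c = o
      · simp [List.isPrefixOf, hc, ih f (nc :: acc) (by simpa using hf)]
      · simp [List.isPrefixOf, hc, Ne.symm hc, ih f (c :: acc) (by simpa using hf)]

theorem replace_single (o nc : Char) (l : List Char) :
    PySem.Chars.replace l [o] [nc] = l.map (fun c => if c = o then nc else c) := by
  simp [PySem.Chars.replace, go_single o nc l l.length [] le_rfl]


theorem pointwise_not_lex : ∀ (as bs : List Char), as.length = bs.length →
    (∀ i (h1 : i < as.length) (h2 : i < bs.length), as[i] ≤ bs[i]) →
    ¬ List.Lex (· < ·) bs as := by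
  intro as
  induction as with
  | nil =>
    intro bs hlen _ hl
    rw [List.length_nil] at hlen
    rw [List.eq_nil_of_length_eq_zero hlen.symm] at hl
    cases hl
  | cons a t ih =>
    intro bs hlen h hl
    cases bs with
    | nil => simp at hlen
    | cons b s =>
      cases hl with
      | cons htail =>
        refine ih s (by simpa using hlen) (fun i h1 h2 => ?_) htail
        simpa using h (i+1) (Nat.succ_lt_succ h1) (Nat.succ_lt_succ h2)
      | rel hlt => exact absurd hlt (not_lt.mpr (h 0 (by simp) (by simp)))

theorem replace_le (pat : String) :
    PySem.Str.replace pat "?" "a" ≤ PySem.Str.replace pat "?" "z" := by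
  by_contra hn
  rw [not_le] at hn
  have hlt := hn
  rw [String.lt_iff_toList_lt] at hlt
  rw [PySem.Str.toList_replace, PySem.Str.toList_replace] at hlt
  have ha := replace_single '?' 'a' pat.toList
  have hz := replace_single '?' 'z' pat.toList
  simp only [show ("?" : String).toList = ['?'] from rfl,
    show ("a" : String).toList = ['a'] from rfl,
    show ("z" : String).toList = ['z'] from rfl, ha, hz] at hlt
  replace hlt := List.lex_lt.mpr hlt
  refine pointwise_not_lex _ _ (by simp) (fun i h1 h2 => ?_) hlt
  have hi : i < pat.toList.length := by simpa using h1
  simp only [List.getElem_map]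
  by_cases hc : pat.toList[i] = '?' <;> simp [hc]

-- generic (LinearOrder) version of PySem's Int-only bisectLeftLoop_spec, same statement
theorem blLoop_spec {α : Type} [LinearOrder α] (xs : List α) (x : α)
    (hs : List.Pairwise (· ≤ ·) xs) :
    ∀ (fuel lo hi : Nat), lo ≤ hi → hi ≤ xs.length → hi - lo ≤ fuel →
    (∀ j (hj : j < xs.length), j < lo → xs[j] < x) →
    (∀ j (hj : j < xs.length), hi ≤ j → x ≤ xs[j]) →
    (∀ j (hj : j < xs.length), j < PySem.List.bisectLeftLoop xs x fuel lo hi → xs[j] < x) ∧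
    (∀ j (hj : j < xs.length), PySem.List.bisectLeftLoop xs x fuel lo hi ≤ j → x ≤ xs[j]) ∧
    PySem.List.bisectLeftLoop xs x fuel lo hi ≤ xs.length := by
  intro fuel
  induction fuel with
  | zero =>
    intro lo hi hlh hhl hf hlow hhigh
    have : lo = hi := by omega
    subst this
    simp only [PySem.List.bisectLeftLoop]
    exact ⟨hlow, fun j hj hle => hhigh j hj hle, by omega⟩
  | succ f ih =>
    intro lo hi hlh hhl hf hlow hhigh
    simp only [PySem.List.bisectLeftLoop]
    by_cases hcmp : lo < hi
    · have hmidlt : (lo + hi) / 2 < xs.length := by omega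
      have hget : xs[(lo + hi) / 2]? = some (xs[(lo + hi) / 2]'hmidlt) := by
        simp [List.getElem?_eq_getElem hmidlt]
      simp only [hcmp, if_pos, hget]
      have hmono := List.pairwise_iff_getElem.mp hs
      by_cases hx : xs[(lo + hi) / 2]'hmidlt < x
      · simp only [hx, if_pos]
        refine ih ((lo + hi) / 2 + 1) hi (by omega) hhl (by omega) ?_ hhigh
        intro j hj hjlt
        rcases Nat.lt_or_ge j ((lo + hi) / 2) with h' | h'
        · exact lt_of_le_of_lt (hmono j _ hj hmidlt h') hx
        · have : j = (lo + hi) / 2 := by omega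
          subst this; exact hx
      · simp only [hx, if_false]
        have hxle : x ≤ xs[(lo + hi) / 2]'hmidlt := le_of_not_gt hx
        refine ih lo ((lo + hi) / 2) (by omega) (by omega) (by omega) hlow ?_
        intro j hj hjge
        rcases Nat.lt_or_ge ((lo + hi) / 2) j with h' | h'
        · exact hxle.trans (hmono _ j hmidlt hj h')
        · have : j = (lo + hi) / 2 := by omega
          subst this; exact hxle
    · simp only [hcmp, if_false]
      have : lo = hi := by omega
      subst this
      exact ⟨hlow, fun j hj hle => hhigh j hj hle, by omega⟩

theorem brLoop_spec {α : Type} [LinearOrder α] (xs : List α) (x : α)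
    (hs : List.Pairwise (· ≤ ·) xs) :
    ∀ (fuel lo hi : Nat), lo ≤ hi → hi ≤ xs.length → hi - lo ≤ fuel →
    (∀ j (hj : j < xs.length), j < lo → xs[j] ≤ x) →
    (∀ j (hj : j < xs.length), hi ≤ j → x < xs[j]) →
    (∀ j (hj : j < xs.length), j < PySem.List.bisectRightLoop xs x fuel lo hi → xs[j] ≤ x) ∧
    (∀ j (hj : j < xs.length), PySem.List.bisectRightLoop xs x fuel lo hi ≤ j → x < xs[j]) ∧
    PySem.List.bisectRightLoop xs x fuel lo hi ≤ xs.length := by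
  intro fuel
  induction fuel with
  | zero =>
    intro lo hi hlh hhl hf hlow hhigh
    have : lo = hi := by omega
    subst this
    simp only [PySem.List.bisectRightLoop]
    exact ⟨hlow, fun j hj hle => hhigh j hj hle, by omega⟩
  | succ f ih =>
    intro lo hi hlh hhl hf hlow hhigh
    simp only [PySem.List.bisectRightLoop]
    by_cases hcmp : lo < hi
    · have hmidlt : (lo + hi) / 2 < xs.length := by omega
      have hget : xs[(lo + hi) / 2]? = some (xs[(lo + hi) / 2]'hmidlt) := by
        simp [List.getElem?_eq_getElem hmidlt]
      simp only [hcmp, if_pos, hget]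
      have hmono := List.pairwise_iff_getElem.mp hs
      by_cases hx : x < xs[(lo + hi) / 2]'hmidlt
      · simp only [hx, if_pos]
        refine ih lo ((lo + hi) / 2) (by omega) (by omega) (by omega) hlow ?_
        intro j hj hjge
        rcases Nat.lt_or_ge ((lo + hi) / 2) j with h' | h'
        · exact lt_of_lt_of_le hx (hmono _ j hmidlt hj h')
        · have : j = (lo + hi) / 2 := by omega
          subst this; exact hx
      · simp only [hx, if_false]
        have hxle : xs[(lo + hi) / 2]'hmidlt ≤ x := le_of_not_gt hx
        refine ih ((lo + hi) / 2 + 1) hi (by omega) hhl (by omega) ?_ hhigh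
        intro j hj hjlt
        rcases Nat.lt_or_ge j ((lo + hi) / 2) with h' | h'
        · exact le_trans (hmono j _ hj hmidlt h') hxle
        · have : j = (lo + hi) / 2 := by omega
          subst this; exact hxle
    · simp only [hcmp, if_false]
      have : lo = hi := by omega
      subst this
      exact ⟨hlow, fun j hj hle => hhigh j hj hle, by omega⟩

theorem countP_eq_of_index {α : Type} (p : α → Bool) :
    ∀ (xs : List α) (r : Nat), r ≤ xs.length →
    (∀ j (hj : j < xs.length), (j < r ↔ p xs[j] = true)) →
    xs.countP p = r := by
  intro xs
  induction xs with
  | nil => intro r hr _; simp at hr; simp [hr]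
  | cons a t ih =>
    intro r hr hch
    cases r with
    | zero =>
      have : ∀ y ∈ a :: t, ¬ p y = true := by
        intro y hy
        obtain ⟨j, hj, rfl⟩ := List.mem_iff_getElem.mp hy
        intro hp
        exact absurd ((hch j hj).mpr hp) (by omega)
      simpa using List.countP_eq_zero.mpr this
    | succ s =>
      have hpa : p a = true := (hch 0 (by simp)).mp (by omega)
      have ht : t.countP p = s := by
        refine ih s (by simpa using hr) (fun j hj => ?_)
        have h2 := hch (j+1) (Nat.succ_lt_succ hj)
        simp only [List.getElem_cons_succ] at h2
        exact (by omega : j < s ↔ j + 1 < s + 1).trans h2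
      simp [List.countP_cons, hpa, ht]

theorem bisectLeft_eq_countP {α : Type} [LinearOrder α] (xs : List α) (x : α)
    (hs : List.Pairwise (· ≤ ·) xs) :
    PySem.List.bisectLeft xs x = xs.countP (fun y => decide (y < x)) := by
  obtain ⟨h1, h2, h3⟩ := blLoop_spec xs x hs xs.length 0 xs.length (by omega) le_rfl (by omega)
    (by intro j hj h0; omega) (fun j hj hle => absurd hle (by omega))
  refine (countP_eq_of_index _ xs _ h3 (fun j hj => ?_)).symm
  constructor
  · intro hlt; simpa using h1 j hj hlt
  · intro hp
    by_contra hge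
    exact absurd (of_decide_eq_true hp) (not_lt.mpr (h2 j hj (by omega)))

theorem bisectRight_eq_countP {α : Type} [LinearOrder α] (xs : List α) (x : α)
    (hs : List.Pairwise (· ≤ ·) xs) :
    PySem.List.bisectRight xs x = xs.countP (fun y => decide (y ≤ x)) := by
  obtain ⟨h1, h2, h3⟩ := brLoop_spec xs x hs xs.length 0 xs.length (by omega) le_rfl (by omega)
    (by intro j hj h0; omega) (fun j hj hle => absurd hle (by omega))
  refine (countP_eq_of_index _ xs _ h3 (fun j hj => ?_)).symm
  constructor
  · intro hlt; simpa using h1 j hj hlt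
  · intro hp
    by_contra hge
    exact absurd (of_decide_eq_true hp) (not_le.mpr (h2 j hj (by omega)))

theorem countP_range_diff {α : Type} [LinearOrder α] (lo hi : α) (hlohi : lo ≤ hi) (L : List α) :
    ((L.countP (fun y => decide (y ≤ hi)) : Nat) : Int) - ((L.countP (fun y => decide (y < lo)) : Nat) : Int)
      = ((L.countP (fun y => decide (lo ≤ y) && decide (y ≤ hi)) : Nat) : Int) := by
  induction L with
  | nil => simp
  | cons a t ih =>
    simp only [List.countP_cons]
    rcases lt_or_ge a lo with h2 | h2
    · have h1 : a ≤ hi := le_of_lt (lt_of_lt_of_le h2 hlohi)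
      have h3 : ¬ lo ≤ a := not_le.mpr h2
      simp only [h1, h2, h3, decide_true, decide_false, Bool.false_and, if_true, if_false]
      push_cast
      omega
    · have h3 : lo ≤ a := h2
      have h2' : ¬ a < lo := not_lt.mpr h3
      by_cases h1 : a ≤ hi
      · simp only [h1, h2', h3, decide_true, decide_false, Bool.true_and, if_true, if_false]
        push_cast
        omega
      · simp only [h1, h2', h3, decide_true, decide_false, Bool.true_and, if_true, if_false]
        push_cast
        omega


theorem fold_pair (g : String → String) : ∀ (ws : List String) (s1 s2 : List (List String)),
    ws.foldl (fun (st : List (List String) × List (List String)) word =>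
        (st.1.set word.length (st.1.getD word.length [] ++ [word]),
         st.2.set word.length (st.2.getD word.length [] ++ [g word]))) (s1, s2)
      = (ws.foldl (fun st w => st.set w.length (st.getD w.length [] ++ [w])) s1,
         ws.foldl (fun st w => st.set w.length (st.getD w.length [] ++ [g w])) s2) := by
  intro ws
  induction ws with
  | nil => intro s1 s2; rfl
  | cons w t ih => intro s1 s2; simp only [List.foldl_cons]; exact ih _ _

theorem fold_length (f : String → String) : ∀ (ws : List String) (init : List (List String)),
    (ws.foldl (fun st w => st.set w.length (st.getD w.length [] ++ [f w])) init).length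
      = init.length := by
  intro ws
  induction ws with
  | nil => intro init; rfl
  | cons w t ih => intro init; simp only [List.foldl_cons]; rw [ih, List.length_set]

theorem bucket_getD (f : String → String) : ∀ (ws : List String) (init : List (List String))
    (n : Nat), n < init.length →
    (ws.foldl (fun st w => st.set w.length (st.getD w.length [] ++ [f w])) init).getD n []
      = init.getD n [] ++ (ws.filter (fun w => w.length = n)).map f := by
  intro ws
  induction ws with
  | nil => intro init n _; simp
  | cons w t ih =>
    intro init n hn
    simp only [List.foldl_cons, List.filter_cons]
    by_cases hw : w.length = n
    · subst hw
      rw [ih _ w.length (by rwa [List.length_set])]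
      have hset : (init.set w.length (init.getD w.length [] ++ [f w])).getD w.length []
          = init.getD w.length [] ++ [f w] := by
        simp [List.getD, List.getElem?_set_self hn]
      rw [hset]
      simp [List.append_assoc]
    · rw [ih _ n (by rwa [List.length_set])]
      have hset : (init.set w.length (init.getD w.length [] ++ [f w])).getD n []
          = init.getD n [] := by
        simp [List.getD, List.getElem?_set_ne hw]
      rw [hset]
      simp [hw]

theorem getD_map_sorted (a : List (List String)) (n : Nat) (hn : n < a.length) :
    (a.map (fun l => PySem.List.sorted l (fun x => x))).getD n []
      = PySem.List.sorted (a.getD n []) (fun x => x) := by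
  simp [List.getD, List.getElem?_map, List.getElem?_eq_getElem hn]

-- the single-query value both programs compute, given a sorted-permutation bucket
theorem count_eq (bucket : List String) (lo hi : String) (hlohi : lo ≤ hi) :
    count_by_range (PySem.List.sorted bucket (fun x => x)) lo hi
      = ((bucket.countP (fun y => decide (lo ≤ y) && decide (y ≤ hi)) : Nat) : Int) := by
  unfold count_by_range
  have hs : List.Pairwise (· ≤ ·) (PySem.List.sorted bucket (fun x => x)) := by
    simpa using PySem.List.sorted_pairwise bucket (fun x => x)
  rw [bisectLeft_eq_countP _ lo hs, bisectRight_eq_countP _ hi hs]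
  rw [(PySem.List.sorted_perm bucket (fun x => x) false).countP_eq,
      (PySem.List.sorted_perm bucket (fun x => x) false).countP_eq]
  exact countP_range_diff lo hi hlohi bucket

theorem solution_eq_alt (words queries : List String)
    (hq : ∀ q ∈ queries, q ≠ "" ∧ q.length ≤ 10000) :
    solution words queries = solution_alt words queries := by
  unfold solution solution_alt
  simp only [fold_pair pyRev]
  rw [PySem.List.foldl_append_singleton_eq_map]
  rw [List.nil_append]
  refine List.map_congr_left (fun q hqmem => ?_)
  obtain ⟨hne, hlen⟩ := hq q hqmem
  obtain ⟨c, cs, hcs⟩ : ∃ c cs, q.toList = c :: cs := by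
    cases hq' : q.toList with
    | nil => exact absurd (by simpa using congrArg String.ofList hq') hne
    | cons c cs => exact ⟨c, cs, rfl⟩
  have hget : PySem.Str.pyGet? q 0 = some c := by
    have := PySem.Str.pyGet?_natCast q 0
    simp only [Nat.cast_zero] at this
    simp [this, hcs]
  simp only [hget]
  have hlenA : (List.foldl (fun st w => st.set w.length (st.getD w.length [] ++ [w]))
      (List.replicate 10001 ([] : List String)) words).length = 10001 := by
    rw [fold_length (fun w => w)]; rw [List.length_replicate]
  have hlenR : (List.foldl (fun st w => st.set w.length (st.getD w.length [] ++ [pyRev w]))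
      (List.replicate 10001 ([] : List String)) words).length = 10001 := by
    rw [fold_length pyRev]; rw [List.length_replicate]
  have hrepl : (List.replicate 10001 ([] : List String)).getD q.length [] = [] := by
    rw [List.getD_eq_getElem?_getD, List.getElem?_replicate]
    rw [if_pos (by omega : q.length < 10001)]
    rfl
  by_cases hc : c = '?'
  · have hb : (some c == some '?') = true := by rw [hc]; rfl
    rw [if_pos hc]
    simp only [hb, if_true]
    rw [getD_map_sorted _ q.length (by rw [hlenR]; omega)]
    rw [bucket_getD pyRev words _ q.length (by rw [List.length_replicate]; omega)]
    rw [hrepl, List.nil_append, count_eq _ _ _ (replace_le (pyRev q))]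
    simp only [List.countP_map, List.countP_filter]
    congr 1
    refine List.countP_congr (fun w _ => ?_)
    simp only [Function.comp_apply]
    cases h1 : decide (w.length = q.length) <;>
      cases h2 : decide (PySem.Str.replace (pyRev q) "?" "a" ≤ pyRev w) <;>
      cases h3 : decide (pyRev w ≤ PySem.Str.replace (pyRev q) "?" "z") <;> simp [h1, h2, h3]
  · have hb : (some c == some '?') = false := by simpa using hc
    rw [if_neg hc]
    simp only [hb, Bool.false_eq_true, if_false]
    rw [getD_map_sorted _ q.length (by rw [hlenA]; omega)]
    rw [bucket_getD (fun w => w) words _ q.length (by rw [List.length_replicate]; omega)]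
    rw [hrepl, List.nil_append, count_eq _ _ _ (replace_le q)]
    simp only [List.map_id', List.countP_filter]
    congr 1
    refine List.countP_congr (fun w _ => ?_)
    cases h1 : decide (w.length = q.length) <;>
      cases h2 : decide (PySem.Str.replace q "?" "a" ≤ w) <;>
      cases h3 : decide (w ≤ PySem.Str.replace q "?" "z") <;> simp [h1, h2, h3]

-- ===== VERDICT (by name: the statement is the Claim_ definition above) =====
theorem solution_spec : Claim_equal_solution := by
  intro words queries _hdom hpre
  unfold Spec_solution
  exact solution_eq_alt words queries hpre.2
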